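-- pv_equiv track=rewrite | github.com/antoinedelia/advent-of-code | 2023/day07p2.py | is_high_card
-- ===== SOURCE A (Python) =====
-- order = "AKQT987654321J"
--
-- def is_high_card(hand: str):
--     original_hand = hand
--     for char in order:
--         hand = original_hand
--         hand = hand.replace("J", char)
--         if len(set(hand)) == len(hand):
--             return True
--     return False
-- ===== SOURCE B (Python) =====
-- def is_high_card(hand: str):
--     non_j = hand.replace("J", "")
--     return hand.count("J") <= 1 and len(set(non_j)) == len(non_j)
-- ===== Notes on version B (the rewrite author's own statement) =====
-- stated objective: simpler
-- what changed: Replaces the loop that tries all 14 substitution candidates for J with a direct one-pass criterion: the hand can be all-distinct iff it has at most one J and its non-J cards are pairwise distinct.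
import Mathlib
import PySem

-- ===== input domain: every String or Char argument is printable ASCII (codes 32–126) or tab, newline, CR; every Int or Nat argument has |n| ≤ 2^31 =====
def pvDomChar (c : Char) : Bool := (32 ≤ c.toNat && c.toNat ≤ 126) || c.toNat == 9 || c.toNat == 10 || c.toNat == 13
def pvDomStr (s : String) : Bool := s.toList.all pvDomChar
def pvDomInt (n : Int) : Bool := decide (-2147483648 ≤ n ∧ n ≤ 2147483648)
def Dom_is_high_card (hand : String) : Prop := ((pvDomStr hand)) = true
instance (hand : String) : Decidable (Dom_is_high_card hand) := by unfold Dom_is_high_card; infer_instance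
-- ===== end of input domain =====

-- B replaces A's 14-candidate substitution loop by the direct criterion
-- "at most one J and the non-J cards pairwise distinct" (simpler, one pass).

-- ===== PORT A =====
def pvOrder : String := "AKQT987654321J"

def is_high_card_loop (original_hand : String) : List Char → Bool
  | [] => false
  | char :: rest =>
      let hand := PySem.Str.replace original_hand "J" (String.ofList [char])
      if PySem.Set.len (PySem.Set.ofList hand.toList) = PySem.Str.len hand then true
      else is_high_card_loop original_hand rest

def is_high_card (hand : String) : Bool :=
  let original_hand := hand
  is_high_card_loop original_hand pvOrder.toList

-- ===== PORT B =====
def is_high_card_alt (hand : String) : Bool :=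
  let non_j := PySem.Str.replace hand "J" ""
  decide (PySem.Str.count hand "J" ≤ 1) &&
    decide (PySem.Set.len (PySem.Set.ofList non_j.toList) = PySem.Str.len non_j)

-- ===== PRECONDITION & SPEC =====
def Spec_is_high_card (hand : String) (out : Bool) : Prop := out = is_high_card_alt hand
instance (hand : String) (out : Bool) : Decidable (Spec_is_high_card hand out) := by unfold Spec_is_high_card; infer_instance

-- ===== CLAIM (what is proved, stated in full; the proofs are below) =====
def Claim_equal_is_high_card : Prop := ∀ (hand : String), Dom_is_high_card hand → Spec_is_high_card hand (is_high_card hand)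

-- ===== LEMMAS AND PROOFS =====

-- substituting c for 'J'
def pvSub (c x : Char) : Char := if x = 'J' then c else x

theorem pv_replace_go (new : List Char) :
    ∀ (l : List Char) (fuel : Nat) (acc : List Char), l.length ≤ fuel →
      PySem.Chars.replace.go ['J'] new fuel l acc
        = acc.reverse ++ l.flatMap (fun x => if x = 'J' then new else [x]) := by
  intro l
  induction l with
  | nil =>
      intro fuel acc _
      cases fuel <;> simp [PySem.Chars.replace.go]
  | cons c t ih =>
      intro fuel acc hf
      cases fuel with
      | zero => simp at hf
      | succ f =>
        have ht : t.length ≤ f := by simpa using hf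
        by_cases hc : c = 'J'
        · subst hc
          simp [PySem.Chars.replace.go, List.isPrefixOf, ih _ _ ht]
        · have : ('J' == c) = false := by simpa using fun h => hc h.symm
          simp [PySem.Chars.replace.go, List.isPrefixOf, this, ih _ _ ht, hc]

theorem pv_replace_single (l new : List Char) :
    PySem.Chars.replace l ['J'] new
      = l.flatMap (fun x => if x = 'J' then new else [x]) := by
  simp [PySem.Chars.replace, pv_replace_go new l l.length [] (le_refl _)]

theorem pv_replace_map (l : List Char) (c : Char) :
    PySem.Chars.replace l ['J'] [c] = l.map (pvSub c) := by
  rw [pv_replace_single]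
  induction l with
  | nil => rfl
  | cons x t ih => by_cases hx : x = 'J' <;> simp [hx, pvSub, ih]

theorem pv_replace_del (l : List Char) :
    PySem.Chars.replace l ['J'] [] = l.filter (fun x => !(x == 'J')) := by
  rw [pv_replace_single]
  induction l with
  | nil => rfl
  | cons x t ih => by_cases hx : x = 'J' <;> simp [hx, ih]

theorem pv_count_go :
    ∀ (l : List Char) (fuel : Nat) (acc : Nat), l.length ≤ fuel →
      PySem.Chars.count.go ['J'] fuel l acc = acc + l.count 'J' := by
  intro l
  induction l with
  | nil =>
      intro fuel acc _
      cases fuel <;> simp [PySem.Chars.count.go]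
  | cons c t ih =>
      intro fuel acc hf
      cases fuel with
      | zero => simp at hf
      | succ f =>
        have ht : t.length ≤ f := by simpa using hf
        by_cases hc : c = 'J'
        · subst hc
          simp [PySem.Chars.count.go, List.isPrefixOf, ih _ _ ht]
          omega
        · have : ('J' == c) = false := by simpa using fun h => hc h.symm
          simp [PySem.Chars.count.go, List.isPrefixOf, this, ih _ _ ht, hc]

theorem pv_count_single (l : List Char) :
    PySem.Chars.count l ['J'] = l.count 'J' := by
  simp [PySem.Chars.count, pv_count_go l l.length 0 (le_refl _)]

theorem pv_setlen_iff (l : List Char) :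
    (PySem.Set.ofList l).length = l.length ↔ l.Nodup := by
  induction l using List.reverseRecOn with
  | nil => simp [PySem.Set.ofList]
  | append_singleton t x ih =>
      rw [PySem.Set.ofList_append_singleton]
      have hle := PySem.Set.length_ofList_le t
      by_cases hx : x ∈ PySem.Set.ofList t
      · have hx' : x ∈ t := (PySem.Set.mem_ofList t x).mp hx
        have he : (PySem.Set.ofList t).add x = PySem.Set.ofList t := by
          simp [PySem.Set.add, PySem.Set.contains, hx]
        rw [he]
        simp only [List.length_append, List.length_singleton]
        constructor
        · intro h; omega
        · intro h; exact ((List.disjoint_of_nodup_append h) hx' (by simp)).elim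
      · have he : (PySem.Set.ofList t).add x = PySem.Set.ofList t ++ [x] := by
          simp [PySem.Set.add, PySem.Set.contains, hx]
        rw [he]
        have hx' : x ∉ t := fun h => hx ((PySem.Set.mem_ofList t x).mpr h)
        simp only [List.length_append, List.length_singleton]
        constructor
        · intro h
          have hnt : t.Nodup := ih.mp (by omega)
          exact hnt.append (List.nodup_singleton x)
            (fun a ha hb => by simp at hb; exact hx' (hb ▸ ha))
        · intro h
          have hnt : t.Nodup := (List.nodup_append.mp h).1
          have := ih.mpr hnt
          omega

theorem pv_count_le (l : List Char) (c : Char) :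
    l.count 'J' ≤ (l.map (pvSub c)).count c := by
  induction l with
  | nil => simp
  | cons x t ih =>
      by_cases hx : x = 'J'
      · simp [pvSub, hx]; omega
      · have h2 : (x == 'J') = false := by simp [hx]
        simp [List.count_cons, pvSub, hx, h2]
        split <;> omega

theorem pv_filter_sublist (l : List Char) (c : Char) :
    List.Sublist (l.filter (fun x => !(x == 'J'))) (l.map (pvSub c)) := by
  induction l with
  | nil => simp
  | cons x t ih =>
      by_cases hx : x = 'J'
      · simp [pvSub, hx]
        exact ih.cons _
      · simp [pvSub, hx]
        exact ih

theorem pv_map_J (l : List Char) : l.map (pvSub 'J') = l := by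
  induction l with
  | nil => rfl
  | cons x t ih => by_cases hx : x = 'J' <;> simp [pvSub, hx, ih]

theorem pv_nodup_of (l : List Char)
    (h1 : l.count 'J' ≤ 1) (h2 : (l.filter (fun x => !(x == 'J'))).Nodup) :
    l.Nodup := by
  rw [List.nodup_iff_count_le_one]
  intro a
  by_cases ha : a = 'J'
  · simpa [ha] using h1
  · have := (List.nodup_iff_count_le_one.mp h2) a
    rwa [List.count_filter (by simp [ha])] at this

theorem pv_loop_iff (orig : String) (cs : List Char) :
    is_high_card_loop orig cs = true
      ↔ ∃ c ∈ cs, ((PySem.Str.replace orig "J" (String.ofList [c])).toList).Nodup := by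
  induction cs with
  | nil => simp [is_high_card_loop]
  | cons c rest ih =>
      simp only [is_high_card_loop]
      split
      · rename_i h
        rw [PySem.Set.len, PySem.Str.len_eq, Nat.cast_inj] at h
        simp only [true_iff]
        exact ⟨c, List.mem_cons_self, (pv_setlen_iff _).mp h⟩
      · rename_i h
        rw [PySem.Set.len, PySem.Str.len_eq, Nat.cast_inj] at h
        rw [ih]
        constructor
        · rintro ⟨d, hd, hnd⟩; exact ⟨d, List.mem_cons_of_mem _ hd, hnd⟩
        · rintro ⟨d, hd, hnd⟩
          rcases List.mem_cons.mp hd with rfl | hd'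
          · exact absurd ((pv_setlen_iff _).mpr hnd) h
          · exact ⟨d, hd', hnd⟩

theorem pv_main (hand : String) : is_high_card hand = is_high_card_alt hand := by
  rw [Bool.eq_iff_iff]
  set l := hand.toList with hl
  have hrep : ∀ c : Char,
      (PySem.Str.replace hand "J" (String.ofList [c])).toList = l.map (pvSub c) := by
    intro c
    rw [PySem.Str.toList_replace]
    have h1 : ("J" : String).toList = ['J'] := by decide
    have h2 : (String.ofList [c]).toList = [c] := String.toList_ofList
    rw [h1, h2, pv_replace_map]
  have hdel : (PySem.Str.replace hand "J" "").toList = l.filter (fun x => !(x == 'J')) := by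
    rw [PySem.Str.toList_replace]
    have h1 : ("J" : String).toList = ['J'] := by decide
    have h2 : ("" : String).toList = [] := rfl
    rw [h1, h2, pv_replace_del]
  constructor
  · intro hA
    obtain ⟨c, _, hnd⟩ := (pv_loop_iff hand pvOrder.toList).mp hA
    rw [hrep c] at hnd
    have hcount : l.count 'J' ≤ 1 := by
      have := pv_count_le l c
      have hc := (List.nodup_iff_count_le_one.mp hnd) c
      omega
    have hfilter : (l.filter (fun x => !(x == 'J'))).Nodup :=
      (pv_filter_sublist l c).nodup hnd
    unfold is_high_card_alt
    simp only [Bool.and_eq_true, decide_eq_true_eq]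
    refine ⟨?_, ?_⟩
    · rw [PySem.Str.count_eq]
      have h1 : ("J" : String).toList = ['J'] := by decide
      rw [h1, pv_count_single]; exact hcount
    · rw [PySem.Set.len, PySem.Str.len_eq, Nat.cast_inj, hdel]
      exact (pv_setlen_iff _).mpr hfilter
  · intro hB
    unfold is_high_card_alt at hB
    simp only [Bool.and_eq_true, decide_eq_true_eq] at hB
    obtain ⟨hcount, hset⟩ := hB
    rw [PySem.Str.count_eq] at hcount
    have h1 : ("J" : String).toList = ['J'] := by decide
    rw [h1, pv_count_single] at hcount
    rw [PySem.Set.len, PySem.Str.len_eq, Nat.cast_inj, hdel] at hset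
    have hfilter : (l.filter (fun x => !(x == 'J'))).Nodup := (pv_setlen_iff _).mp hset
    have hnl : l.Nodup := pv_nodup_of l hcount hfilter
    apply (pv_loop_iff hand pvOrder.toList).mpr
    refine ⟨'J', ?_, ?_⟩
    · decide
    · rw [hrep 'J', pv_map_J]; exact hnl

-- ===== VERDICT (by name: the statement is the Claim_ definition above) =====
theorem is_high_card_spec : Claim_equal_is_high_card := by
  intro hand _
  unfold Spec_is_high_card
  exact pv_main hand
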